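-- pv_equiv track=rewrite | github.com/Oichkatzelesfrettschen/steinmarder | src/re/apple/scripts/sync_apple_typed_atlas.py | canonical_format_name
-- ===== SOURCE A (Python) =====
-- def canonical_format_name(name: str, taxonomy_bits: dict[str, str]) -> str | None:
--     candidate = (name or "").strip()
--     while True:
--         if candidate.startswith("fmt_"):
--             candidate = candidate[len("fmt_"):]
--             continue
--         if candidate.startswith("trace_"):
--             candidate = candidate[len("trace_"):]
--             continue
--         break
--     return candidate if candidate in taxonomy_bits else None
-- ===== SOURCE B (Python) =====
-- import re
--
-- _PREFIX_RUN = re.compile(r'^(?:fmt_|trace_)+')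
--
-- def canonical_format_name(name, taxonomy_bits):
--     candidate = _PREFIX_RUN.sub('', (name or '').strip())
--     return candidate if candidate in taxonomy_bits else None
-- ===== Notes on version B (the rewrite author's own statement) =====
-- stated objective: idiomatic
-- what changed: The while-loop that repeatedly tests startswith and re-slices the string is replaced by one anchored regex substitution re.sub(r'^(?:fmt_|trace_)+', '', candidate) that strips the whole leading run of prefixes in a single pass.
import Mathlib
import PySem

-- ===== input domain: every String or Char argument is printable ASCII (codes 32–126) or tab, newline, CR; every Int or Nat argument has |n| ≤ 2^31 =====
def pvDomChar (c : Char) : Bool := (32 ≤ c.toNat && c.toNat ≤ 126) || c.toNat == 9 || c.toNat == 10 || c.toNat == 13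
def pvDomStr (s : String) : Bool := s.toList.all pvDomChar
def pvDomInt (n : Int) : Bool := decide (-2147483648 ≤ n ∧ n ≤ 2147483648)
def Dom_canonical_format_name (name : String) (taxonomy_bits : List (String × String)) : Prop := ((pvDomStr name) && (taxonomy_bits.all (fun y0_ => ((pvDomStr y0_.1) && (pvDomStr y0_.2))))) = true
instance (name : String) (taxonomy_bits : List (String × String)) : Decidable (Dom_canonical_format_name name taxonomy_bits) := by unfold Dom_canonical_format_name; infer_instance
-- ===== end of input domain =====

-- B replaces A's startswith/re-slice while-loop by one anchored regex pass stripping the whole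
-- leading (fmt_|trace_)+ run; objective: idiomatic, same cost.

-- ===== PORT A =====
-- A's `while True` loop: test startswith("fmt_") / startswith("trace_"), re-slice, repeat.
def pyWhileA (c : List Char) : List Char :=
  if PySem.Chars.startswith c ("fmt_".toList) then
    pyWhileA (PySem.List.slice c (some 4) none)
  else if PySem.Chars.startswith c ("trace_".toList) then
    pyWhileA (PySem.List.slice c (some 6) none)
  else c
termination_by c.length
decreasing_by
  · rename_i h
    rw [PySem.Chars.startswith_iff] at h
    have hlen := h.length_le
    have h4 : PySem.List.slice c (some 4) none = c.drop 4 := by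
      simpa using PySem.List.slice_from_natCast c 4
    simp [h4] at hlen ⊢
    omega
  · rename_i _ h
    rw [PySem.Chars.startswith_iff] at h
    have hlen := h.length_le
    have h6 : PySem.List.slice c (some 6) none = c.drop 6 := by
      simpa using PySem.List.slice_from_natCast c 6
    simp [h6] at hlen ⊢
    omega

def canonical_format_name (name : String) (taxonomy_bits : List (String × String)) : Option String :=
  -- candidate = (name or "").strip()
  let base : String := if name == "" then "" else name
  let candidate : List Char := (PySem.Str.strip base).toList
  let candidate : List Char := pyWhileA candidate
  -- return candidate if candidate in taxonomy_bits else None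
  if taxonomy_bits.any (fun kv => kv.1 == String.ofList candidate) then some (String.ofList candidate) else none

-- ===== PORT B =====
-- hand port of the anchored regex sub r'^(?:fmt_|trace_)+' → '' : the regex engine's single
-- left-to-right pass over the characters, consuming one alternation branch per step; exact on
-- all inputs because the alternation branches are the literal words "fmt_" and "trace_".
def stripRun : List Char → List Char
  | 'f' :: 'm' :: 't' :: '_' :: rest => stripRun rest
  | 't' :: 'r' :: 'a' :: 'c' :: 'e' :: '_' :: rest => stripRun rest
  | cs => cs

def canonical_format_name_alt (name : String) (taxonomy_bits : List (String × String)) : Option String :=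
  let candidate : String := String.ofList (stripRun (PySem.Str.strip name).toList)
  if (taxonomy_bits.map Prod.fst).contains candidate then some candidate else none

-- ===== PRECONDITION & SPEC =====
def Spec_canonical_format_name (name : String) (taxonomy_bits : List (String × String)) (out : Option String) : Prop := out = canonical_format_name_alt name taxonomy_bits
instance (name : String) (taxonomy_bits : List (String × String)) (out : Option String) : Decidable (Spec_canonical_format_name name taxonomy_bits out) := by unfold Spec_canonical_format_name; infer_instance

-- ===== CLAIM (what is proved, stated in full; the proofs are below) =====
def Claim_equal_canonical_format_name : Prop := ∀ (name : String) (taxonomy_bits : List (String × String)), Dom_canonical_format_name name taxonomy_bits → Spec_canonical_format_name name taxonomy_bits (canonical_format_name name taxonomy_bits)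

-- ===== LEMMAS AND PROOFS =====

theorem slice4 (c : List Char) : PySem.List.slice c (some 4) none = c.drop 4 := by
  simpa using PySem.List.slice_from_natCast c 4

theorem slice6 (c : List Char) : PySem.List.slice c (some 6) none = c.drop 6 := by
  simpa using PySem.List.slice_from_natCast c 6

theorem stripRun_eq_pyWhileA (c : List Char) : stripRun c = pyWhileA c := by
  induction c using stripRun.induct with
  | case1 rest ih =>
    rw [stripRun, pyWhileA]
    simp only [show "fmt_".toList = ['f','m','t','_'] from rfl,
               show "trace_".toList = ['t','r','a','c','e','_'] from rfl]
    have hs : PySem.Chars.startswith ('f' :: 'm' :: 't' :: '_' :: rest) ['f','m','t','_'] = true := by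
      rw [PySem.Chars.startswith_iff]; exact ⟨rest, rfl⟩
    rw [if_pos hs, slice4]
    simpa using ih
  | case2 rest ih =>
    rw [stripRun, pyWhileA]
    simp only [show "fmt_".toList = ['f','m','t','_'] from rfl,
               show "trace_".toList = ['t','r','a','c','e','_'] from rfl]
    have hs1 : PySem.Chars.startswith ('t' :: 'r' :: 'a' :: 'c' :: 'e' :: '_' :: rest) ['f','m','t','_'] = false := by
      rw [Bool.eq_false_iff, Ne, PySem.Chars.startswith_iff]
      intro h
      simp [List.cons_prefix_cons] at h
    have hs2 : PySem.Chars.startswith ('t' :: 'r' :: 'a' :: 'c' :: 'e' :: '_' :: rest) ['t','r','a','c','e','_'] = true := by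
      rw [PySem.Chars.startswith_iff]; exact ⟨rest, rfl⟩
    rw [if_neg (by simp [hs1]), if_pos hs2, slice6]
    simpa using ih
  | case3 cs h1 h2 =>
    rw [pyWhileA]
    simp only [show "fmt_".toList = ['f','m','t','_'] from rfl,
               show "trace_".toList = ['t','r','a','c','e','_'] from rfl]
    have hs1 : PySem.Chars.startswith cs ['f','m','t','_'] = false := by
      rw [Bool.eq_false_iff, Ne, PySem.Chars.startswith_iff]
      intro h
      obtain ⟨t, ht⟩ := h
      exact h1 t ht.symm
    have hs2 : PySem.Chars.startswith cs ['t','r','a','c','e','_'] = false := by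
      rw [Bool.eq_false_iff, Ne, PySem.Chars.startswith_iff]
      intro h
      obtain ⟨t, ht⟩ := h
      exact h2 t ht.symm
    rw [if_neg (by simp [hs1]), if_neg (by simp [hs2])]
    rw [stripRun]
    · intro rest hr; exact h1 rest hr
    · intro rest hr; exact h2 rest hr

theorem contains_eq_any (tax : List (String × String)) (s : String) :
    (tax.map Prod.fst).contains s = tax.any (fun kv => kv.1 == s) := by
  induction tax with
  | nil => rfl
  | cons kv rest ih =>
    rw [List.map_cons, List.contains_cons, List.any_cons, ih, BEq.comm]

-- ===== VERDICT (by name: the statement is the Claim_ definition above) =====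
theorem canonical_format_name_spec : Claim_equal_canonical_format_name := by
  intro name tax _
  unfold Spec_canonical_format_name canonical_format_name canonical_format_name_alt
  have hbase : (if name == "" then "" else name) = name := by
    by_cases h : name = "" <;> simp [h]
  simp only [hbase, ← stripRun_eq_pyWhileA, contains_eq_any]
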